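-- pv_equiv track=rewrite | github.com/velasqz/Movie-Free | movies/bouncy_numbers.py | decreciente
-- ===== SOURCE A (Python) =====
-- def enlista(num):
--     '''Devuelve una lista con los digitos de un numero pasado por parámetro'''
--     return list(map(int, str(num)))
--
-- def decreciente(num):
--     '''Devuelve True si el numero pasado por parámetro es decreciente'''
--     lista = enlista(num)
--     decre = True
--     # ciclo para la comparacion de digitos adyacentes
--     for pos in range(0, len(str(num)) - 1):
--         if lista[pos + 1] > lista[pos]:
--             decre = False
--             break
--     return decre
-- ===== SOURCE B (Python) =====
-- def enlista(num):
--     '''Devuelve una lista con los digitos de un numero pasado por parámetro'''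
--     return list(map(int, str(num)))
--
-- def decreciente(num):
--     '''Devuelve True si el numero pasado por parámetro es decreciente'''
--     lista = enlista(num)
--     return lista == sorted(lista, reverse=True)
-- ===== Notes on version B (the rewrite author's own statement) =====
-- stated objective: simpler
-- what changed: Replaces the index-based adjacent-comparison loop with break by a single comparison of the digit list against its descending sort (lista == sorted(lista, reverse=True)).
import Mathlib
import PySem

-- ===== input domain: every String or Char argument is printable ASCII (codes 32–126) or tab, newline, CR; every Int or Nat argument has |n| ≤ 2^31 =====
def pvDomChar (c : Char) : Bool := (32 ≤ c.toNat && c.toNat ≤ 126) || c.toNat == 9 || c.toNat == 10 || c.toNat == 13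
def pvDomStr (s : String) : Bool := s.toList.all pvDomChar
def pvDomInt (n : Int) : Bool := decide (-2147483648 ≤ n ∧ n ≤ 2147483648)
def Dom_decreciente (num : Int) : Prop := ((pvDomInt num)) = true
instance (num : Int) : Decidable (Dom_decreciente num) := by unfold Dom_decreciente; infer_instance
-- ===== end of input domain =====

-- B replaces A's index loop with break by comparing the digit list to its descending sort (simpler).

-- ===== PORT A =====
-- int(c) for a single character c; the .getD 0 is never reached on Pre_ (digits of str(num), num ≥ 0, always parse)
def pvDigit (c : Char) : Int := (PySem.Int.ofChars? [c]).getD 0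

-- enlista(num) = list(map(int, str(num)))
def enlistaL (num : Int) : List Int := (PySem.Int.toChars num).map pvDigit

-- the 'for pos in range(...)' loop with its break, as recursion over the range list
def aLoop (lista : List Int) : List Int → Bool
  | [] => true
  | pos :: rest =>
    if PySem.List.pyGetD lista (pos + 1) 0 > PySem.List.pyGetD lista pos 0 then false
    else aLoop lista rest

def decreciente (num : Int) : Bool :=
  aLoop (enlistaL num) (PySem.List.pyRange 0 (((PySem.Int.toChars num).length : Int) - 1) 1)

-- ===== PORT B =====
def decreciente_alt (num : Int) : Bool :=
  let lista := enlistaL num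
  lista == PySem.List.sorted lista (fun x => x) true

-- ===== PRECONDITION & SPEC =====
-- Pre_ excludes negative inputs, on which str(num) begins with a minus sign and int of that character raises ValueError in A (and likewise in B).
def Pre_decreciente (num : Int) : Prop := 0 ≤ num
instance (num : Int) : Decidable (Pre_decreciente num) := by unfold Pre_decreciente; infer_instance
def pvWitness_decreciente : Int := 9531

def Spec_decreciente (num : Int) (out : Bool) : Prop := out = decreciente_alt num
instance (num : Int) (out : Bool) : Decidable (Spec_decreciente num out) := by unfold Spec_decreciente; infer_instance

-- ===== CLAIM (what is proved, stated in full; the proofs are below) =====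
def Claim_equal_decreciente : Prop := ∀ (num : Int), Dom_decreciente num → Pre_decreciente num → Spec_decreciente num (decreciente num)

-- ===== LEMMAS AND PROOFS =====

theorem aLoop_eq_decide (lista : List Int) (r : List Int) :
    aLoop lista r
      = decide (∀ pos ∈ r, PySem.List.pyGetD lista (pos + 1) 0 ≤ PySem.List.pyGetD lista pos 0) := by
  induction r with
  | nil => simp [aLoop]
  | cons pos rest ih =>
    by_cases h : PySem.List.pyGetD lista (pos + 1) 0 > PySem.List.pyGetD lista pos 0
    · simp [aLoop, h]
    · simp [aLoop, h, ih]
      omega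

theorem adj_getD (l : List Int) (pos : Nat) (h : pos + 1 < l.length) :
    (PySem.List.pyGetD l ((pos : Int) + 1) 0 ≤ PySem.List.pyGetD l (pos : Int) 0)
      ↔ (l[pos + 1]'h ≤ l[pos]'(by omega)) := by
  rw [PySem.List.pyGetD_of_nonneg l 0 (by positivity), PySem.List.pyGetD_of_nonneg l 0 (by positivity)]
  rw [show ((pos : Int) + 1).toNat = pos + 1 by omega, show ((pos : Int)).toNat = pos by omega]
  rw [List.getD_eq_getElem l 0 h, List.getD_eq_getElem l 0 (by omega)]

theorem adjacent_iff_sorted_rev (l : List Int) :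
    (∀ pos ∈ PySem.List.pyRange 0 ((l.length : Int) - 1) 1,
        PySem.List.pyGetD l (pos + 1) 0 ≤ PySem.List.pyGetD l pos 0)
      ↔ l = PySem.List.sorted l (fun x => x) true := by
  constructor
  · intro h
    refine (PySem.List.sorted_rev_eq_self_of_pairwise l (fun x => x) ?_).symm
    refine List.IsChain.pairwise ?_
    refine List.isChain_iff_getElem.mpr ?_
    intro i hi
    have hmem : (i : Int) ∈ PySem.List.pyRange 0 ((l.length : Int) - 1) 1 :=
      PySem.List.mem_pyRange_one.mpr ⟨by positivity, by omega⟩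
    exact (adj_getD l i hi).mp (h (i : Int) hmem)
  · intro h pos hpos
    obtain ⟨h0, h1⟩ := PySem.List.mem_pyRange_one.mp hpos
    have hpair : l.Pairwise (fun a b : Int => b ≤ a) := by
      have := PySem.List.sorted_pairwise_rev l (fun x : Int => x)
      rwa [← h] at this
    have hchain := List.isChain_iff_getElem.mp hpair.isChain
    have hb : pos.toNat + 1 < l.length := by omega
    have hc : ((pos.toNat : Int)) = pos := by omega
    rw [← hc]
    exact (adj_getD l pos.toNat hb).mpr (hchain pos.toNat hb)

theorem decreciente_eq_alt (num : Int) : decreciente num = decreciente_alt num := by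
  unfold decreciente decreciente_alt
  have hlen : ((PySem.Int.toChars num).length : Int) = ((enlistaL num).length : Int) := by
    simp [enlistaL]
  rw [hlen, aLoop_eq_decide, Bool.eq_iff_iff]
  simp only [decide_eq_true_eq, beq_iff_eq]
  exact adjacent_iff_sorted_rev (enlistaL num)

-- ===== VERDICT (by name: the statement is the Claim_ definition above) =====
theorem decreciente_spec : Claim_equal_decreciente := by
  intro num _hdom _hpre
  unfold Spec_decreciente
  exact decreciente_eq_alt num
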